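-- pv_equiv track=rewrite | github.com/IriaiSan/Ene | nanobot/agent/security.py | sanitize_dad_ids
-- ===== SOURCE A (Python) =====
-- DAD_IDS: set[str] = {"telegram:8559611823", "discord:1175414972482846813"}
--
-- _DAD_RAW_IDS: set[str] = {pid.split(":", 1)[1] for pid in DAD_IDS}
--
-- def sanitize_dad_ids(content: str, caller_id: str) -> str:
--     """Strip Dad's raw platform IDs from non-Dad message content."""
--     if caller_id in DAD_IDS:
--         return content
--     result = content
--     for raw_id in _DAD_RAW_IDS:
--         if raw_id in result:
--             result = result.replace(raw_id, "[someone's_id]")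
--     return result
-- ===== SOURCE B (Python) =====
-- DAD_IDS: set[str] = {"telegram:8559611823", "discord:1175414972482846813"}
--
-- _RAW_IDS: tuple[str, ...] = ("8559611823", "1175414972482846813")
-- _PLACEHOLDER = "[someone's_id]"
--
-- def sanitize_dad_ids(content: str, caller_id: str) -> str:
--     """Strip Dad's raw platform IDs from non-Dad message content (single left-to-right scan)."""
--     if caller_id in DAD_IDS:
--         return content
--     out = []
--     i = 0
--     n = len(content)
--     while i < n:
--         for rid in _RAW_IDS:
--             if content.startswith(rid, i):
--                 out.append(_PLACEHOLDER)
--                 i += len(rid)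
--                 break
--         else:
--             out.append(content[i])
--             i += 1
--     return "".join(out)
-- ===== Notes on version B (the rewrite author's own statement) =====
-- stated objective: alternative
-- what changed: Replaces the per-ID loop of repeated str.replace passes (each a full scan building a new string) with a single left-to-right scan of the content that matches either raw ID at each position and emits the placeholder or the character once.
import Mathlib
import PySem

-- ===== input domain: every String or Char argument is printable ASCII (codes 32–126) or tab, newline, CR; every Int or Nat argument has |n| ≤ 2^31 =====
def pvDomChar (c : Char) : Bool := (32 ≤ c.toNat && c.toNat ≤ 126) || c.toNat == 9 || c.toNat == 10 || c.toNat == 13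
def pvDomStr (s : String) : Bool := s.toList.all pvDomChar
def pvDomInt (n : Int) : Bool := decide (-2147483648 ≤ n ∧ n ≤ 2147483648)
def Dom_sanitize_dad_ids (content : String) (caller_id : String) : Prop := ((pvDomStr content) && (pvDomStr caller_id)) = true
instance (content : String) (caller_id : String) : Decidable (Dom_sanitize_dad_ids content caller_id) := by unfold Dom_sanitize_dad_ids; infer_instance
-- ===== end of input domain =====

-- B replaces A's per-ID loop of full replace passes by one left-to-right scan that
-- matches either raw ID at each position (objective: alternative single-pass algorithm).


-- ===== PORT A =====
-- DAD_IDS (a Python set literal) and _DAD_RAW_IDS (a set comprehension over it).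
def pvDadIds : PySem.Set String := PySem.Set.ofList ["telegram:8559611823", "discord:1175414972482846813"]
-- pid.split(":", 1)[1]
def pvRawOf (pid : String) : String :=
  (PySem.List.pyGet? ((PySem.Str.splitMax? pid ":" 1).getD []) 1).getD ""
def pvDadRawIds : PySem.Set String := PySem.Set.ofList (pvDadIds.map pvRawOf)

def sanitize_dad_ids (content : String) (caller_id : String) : String :=
  if PySem.Set.contains pvDadIds caller_id then content
  else
    pvDadRawIds.foldl
      (fun result raw_id =>
        if PySem.Str.isIn raw_id result then PySem.Str.replace result raw_id "[someone's_id]"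
        else result)
      content

-- ===== PORT B =====
def pvAltDadIds : PySem.Set String := PySem.Set.ofList ["telegram:8559611823", "discord:1175414972482846813"]
def pvIdS : List Char := "8559611823".toList
def pvIdL : List Char := "1175414972482846813".toList
def pvPlaceholder : List Char := "[someone's_id]".toList

-- the while-loop of B: one pass, at each position try each raw ID, else copy the char
def pvScan : List Char → List Char
  | [] => []
  | c :: t =>
    if pvIdS.isPrefixOf (c :: t) then pvPlaceholder ++ pvScan (t.drop 9)
    else if pvIdL.isPrefixOf (c :: t) then pvPlaceholder ++ pvScan (t.drop 18)
    else c :: pvScan t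
termination_by s => s.length
decreasing_by
  all_goals simp

def sanitize_dad_ids_alt (content : String) (caller_id : String) : String :=
  if PySem.Set.contains pvAltDadIds caller_id then content
  else String.ofList (pvScan content.toList)

-- ===== PRECONDITION & SPEC =====
def Spec_sanitize_dad_ids (content : String) (caller_id : String) (out : String) : Prop := out = sanitize_dad_ids_alt content caller_id
instance (content : String) (caller_id : String) (out : String) : Decidable (Spec_sanitize_dad_ids content caller_id out) := by unfold Spec_sanitize_dad_ids; infer_instance

-- ===== CLAIM (what is proved, stated in full; the proofs are below) =====
def Claim_equal_sanitize_dad_ids : Prop := ∀ (content : String) (caller_id : String), Dom_sanitize_dad_ids content caller_id → Spec_sanitize_dad_ids content caller_id (sanitize_dad_ids content caller_id)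

-- ===== LEMMAS AND PROOFS =====
set_option maxRecDepth 8192

-- proof-side literal spellings of the two raw IDs (head/tail split) and the placeholder
def pvTailS : List Char := ['5','5','9','6','1','1','8','2','3']
def pvTailL : List Char := ['1','7','5','4','1','4','9','7','2','4','8','2','8','4','6','8','1','3']

theorem pvIdS_eq : pvIdS = '8' :: pvTailS := by decide
theorem pvIdL_eq : pvIdL = '1' :: pvTailL := by decide
set_option maxRecDepth 32768 in
theorem pvPlaceholder_chars :
    pvPlaceholder = ['[','s','o','m','e','o','n','e','\'','s','_','i','d',']'] := by decide
theorem pvPh_no1 : ∀ c ∈ pvPlaceholder, c ≠ '1' := by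
  rw [pvPlaceholder_chars]; intro c hc; fin_cases hc <;> decide
theorem pvTailL_noLB : ∀ c ∈ pvTailL, c ≠ '[' := by
  intro c hc; fin_cases hc <;> decide

-- structural model of Python's str.replace (old = o :: os nonempty)
def pvRep (o : Char) (os : List Char) (new : List Char) : List Char → List Char
  | [] => []
  | c :: t =>
    if (o :: os).isPrefixOf (c :: t) then new ++ pvRep o os new (t.drop os.length)
    else c :: pvRep o os new t
termination_by s => s.length
decreasing_by
  all_goals simp

theorem pvGo_eq (o : Char) (os new : List Char) :
    ∀ fuel s acc, s.length ≤ fuel →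
      PySem.Chars.replace.go (o :: os) new fuel s acc = acc.reverse ++ pvRep o os new s := by
  intro fuel
  induction fuel with
  | zero =>
    intro s acc h
    have : s = [] := List.eq_nil_of_length_eq_zero (Nat.le_zero.mp h)
    subst this
    rw [PySem.Chars.replace.go.eq_def]
    simp [pvRep]
  | succ n ih =>
    intro s acc h
    cases s with
    | nil => rw [PySem.Chars.replace.go.eq_def]; simp [pvRep]
    | cons c t =>
      rw [PySem.Chars.replace.go.eq_def]
      by_cases hp : (o :: os).isPrefixOf (c :: t) = true
      · simp only [hp, if_true]
        rw [ih]
        · simp [pvRep, hp]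
        · simp at h ⊢; omega
      · simp only [hp, if_false, Bool.false_eq_true]
        rw [ih]
        · simp [pvRep, hp]
        · simp at h; omega

theorem pvRep_eq_replace (o : Char) (os new s : List Char) :
    PySem.Chars.replace s (o :: os) new = pvRep o os new s := by
  unfold PySem.Chars.replace
  simp [pvGo_eq o os new s.length s [] (le_refl _)]

-- no occurrence ⇒ identity
theorem pvRep_id (o : Char) (os new : List Char) :
    ∀ s, ¬ ((o :: os) <:+: s) → pvRep o os new s = s := by
  intro s
  induction s with
  | nil => intro _; simp [pvRep]
  | cons c t ih =>
    intro h
    rw [pvRep]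
    have hp : ¬ ((o :: os).isPrefixOf (c :: t) = true) := by
      intro hpre
      exact h (List.IsPrefix.isInfix (List.isPrefixOf_iff_prefix.mp hpre))
    simp only [hp, if_false, Bool.false_eq_true]
    rw [ih]
    intro hinf
    exact h (hinf.trans (List.suffix_cons c t).isInfix)

-- no char of a equals the head of old ⇒ replace passes a through
theorem pvRep_append_left (o : Char) (os new : List Char)
    (a : List Char) (ha : ∀ c ∈ a, c ≠ o) (b : List Char) :
    pvRep o os new (a ++ b) = a ++ pvRep o os new b := by
  induction a with
  | nil => simp
  | cons c a' ih =>
    have hc : c ≠ o := ha c (by simp)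
    rw [List.cons_append, pvRep]
    have hp : ((o :: os).isPrefixOf (c :: (a' ++ b))) = false := by
      simp [List.isPrefixOf]
      intro h; exact absurd h.symm hc
    simp only [hp, Bool.false_eq_true, if_false]
    rw [ih (fun c hc => ha c (by simp [hc]))]
    simp

-- match at the head
theorem pvRep_head_match (o : Char) (os new b : List Char) :
    pvRep o os new ((o :: os) ++ b) = new ++ pvRep o os new b := by
  rw [List.cons_append, pvRep]
  have hp : (o :: os).isPrefixOf (o :: (os ++ b)) = true := by
    rw [List.isPrefixOf_iff_prefix]
    exact ⟨b, by simp⟩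
  simp [hp]

-- a prefix avoiding '[' survives pvRep with the placeholder backwards
theorem pvRep_prefix_lift (o : Char) (os : List Char) :
    ∀ (t p : List Char), (∀ c ∈ p, c ≠ '[') → p.isPrefixOf (pvRep o os pvPlaceholder t) = true →
      p.isPrefixOf t = true := by
  intro t
  induction t with
  | nil => intro p _ h; simpa [pvRep] using h
  | cons c t' ih =>
    intro p hp h
    rw [pvRep] at h
    by_cases hm : (o :: os).isPrefixOf (c :: t') = true
    · simp only [hm, if_true] at h
      cases p with
      | nil => simp
      | cons q p' =>
        exfalso
        have hq : q = '[' := by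
          rcases List.isPrefixOf_iff_prefix.mp h with ⟨r, hr⟩
          have h2 : q :: (p' ++ r)
              = pvPlaceholder ++ pvRep o os pvPlaceholder (t'.drop os.length) := by
            simpa using hr
          have h3 := congrArg (fun l => l.head?) h2
          simpa [pvPlaceholder_chars] using h3
        exact hp q (by simp) hq
    · simp only [hm, Bool.false_eq_true, if_false] at h
      cases p with
      | nil => simp
      | cons q p' =>
        simp only [List.isPrefixOf, Bool.and_eq_true, beq_iff_eq] at h ⊢
        exact ⟨h.1, ih p' (fun c hc => hp c (by simp [hc])) h.2⟩

-- the two literal raw IDs never overlap: replacing the short ID passes a head-match of the long one through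
theorem pvPassS (b : List Char) :
    pvRep '8' pvTailS pvPlaceholder (('1' :: pvTailL) ++ b)
      = ('1' :: pvTailL) ++ pvRep '8' pvTailS pvPlaceholder b := by
  simp [pvTailL, pvTailS, pvRep, List.isPrefixOf]

-- core: the single pass equals replace-idS-then-replace-idL
theorem pvScan_eq (s : List Char) :
    pvScan s = pvRep '1' pvTailL pvPlaceholder (pvRep '8' pvTailS pvPlaceholder s) := by
  induction s using pvScan.induct with
  | case1 => simp [pvScan, pvRep]
  | case2 c t hS ih =>
    have hS' : ('8' :: pvTailS).isPrefixOf (c :: t) = true := by rw [← pvIdS_eq]; exact hS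
    rcases List.isPrefixOf_iff_prefix.mp hS' with ⟨b, hb⟩
    have hbt : b = List.drop 9 t := by
      simpa [pvTailS] using congrArg (List.drop 10) hb
    subst hbt
    rw [pvScan, if_pos hS, ← hb, pvRep_head_match,
        pvRep_append_left '1' pvTailL pvPlaceholder pvPlaceholder pvPh_no1 _, ih]
  | case3 c t hS hL ih =>
    have hL' : ('1' :: pvTailL).isPrefixOf (c :: t) = true := by rw [← pvIdL_eq]; exact hL
    rcases List.isPrefixOf_iff_prefix.mp hL' with ⟨b, hb⟩
    have hbt : b = List.drop 18 t := by
      simpa [pvTailL] using congrArg (List.drop 19) hb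
    subst hbt
    rw [pvScan, if_neg hS, if_pos hL, ← hb, pvPassS, pvRep_head_match, ih]
  | case4 c t hS hL ih =>
    rw [pvScan, if_neg hS, if_neg hL]
    have hS' : ¬ ((('8' : Char) :: pvTailS).isPrefixOf (c :: t) = true) := by
      rw [← pvIdS_eq]; exact hS
    rw [pvRep, if_neg hS', pvRep]
    have hnoL : ¬ ((('1' : Char) :: pvTailL).isPrefixOf (c :: pvRep '8' pvTailS pvPlaceholder t) = true) := by
      intro h'
      simp only [List.isPrefixOf, Bool.and_eq_true, beq_iff_eq] at h'
      have hlift := pvRep_prefix_lift '8' pvTailS t pvTailL pvTailL_noLB h'.2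
      have hfull : pvIdL.isPrefixOf (c :: t) = true := by
        rw [pvIdL_eq]
        simp only [List.isPrefixOf, Bool.and_eq_true, beq_iff_eq]
        exact ⟨h'.1, hlift⟩
      exact hL hfull
    rw [if_neg hnoL, ih]

-- one iteration of A's loop, on toList
theorem pvStep_toList (raw : String) (o : Char) (os : List Char) (h : raw.toList = o :: os) (r : String) :
    (if PySem.Str.isIn raw r then PySem.Str.replace r raw "[someone's_id]" else r).toList
      = pvRep o os pvPlaceholder r.toList := by
  by_cases hin : PySem.Str.isIn raw r = true
  · have hP : ("[someone's_id]" : String).toList = pvPlaceholder := by rfl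
    simp only [hin, if_true]
    rw [PySem.Str.toList_replace, h, hP, pvRep_eq_replace]
  · have hni : ¬ (raw.toList <:+: r.toList) := by
      have : PySem.Chars.isIn raw.toList r.toList = false := by
        simpa [PySem.Str.isIn] using hin
      exact (PySem.Chars.isIn_eq_false_iff _ _).mp this
    simp only [hin, Bool.false_eq_true, if_false]
    rw [pvRep_id]
    rw [← h]
    exact hni

-- ===== VERDICT (by name: the statement is the Claim_ definition above) =====
theorem sanitize_dad_ids_spec : Claim_equal_sanitize_dad_ids := by
  intro content caller_id _
  unfold Spec_sanitize_dad_ids sanitize_dad_ids sanitize_dad_ids_alt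
  have hsets : pvDadIds = pvAltDadIds := by decide
  rw [hsets]
  split_ifs with hd
  · rfl
  · have hraw : pvDadRawIds = ["8559611823", "1175414972482846813"] := by decide
    rw [hraw]
    simp only [List.foldl]
    rw [← String.toList_inj,
        pvStep_toList "1175414972482846813" '1' pvTailL (by decide),
        pvStep_toList "8559611823" '8' pvTailS (by decide),
        String.toList_ofList, ← pvScan_eq]
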